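-- pv_equiv track=rewrite | github.com/Panta-Rhei-Research/publications | scripts/verify_publications.py | validate_counts
-- ===== SOURCE A (Python) =====
-- from typing import Any
--
-- EXPECTED_RELEASED_COUNTS = {
--     "research_paper": 9,
--     "research_note": 6,
--     "public_good_briefing": 44,
--     "white_paper": 5,
--     "research_monograph": 7,
--     "monograph_supplement": 2,
--     "synoptic_overview": 1,
--     "guided_tour": 7,
-- }
--
-- EXPECTED_SUPERSEDED_COUNTS = {"public_good_briefing": 1}
--
-- EXPECTED_PLANNED_COUNTS = {"charter_essay": 2}
--
-- EXPECTED_PDF_COUNT = 75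
--
-- EXPECTED_EXTERNAL_COUNT = 7
--
-- def validate_counts(manifests: list[dict[str, Any]]) -> list[str]:
--     released: dict[str, int] = {}
--     superseded: dict[str, int] = {}
--     planned: dict[str, int] = {}
--     ids: set[str] = set()
--     errors: list[str] = []
--     pdf_count = 0
--     external_count = 0
--     for manifest in manifests:
--         publication_id = manifest.get("publication_id")
--         if publication_id in ids:
--             errors.append(f"duplicate publication_id: {publication_id}")
--         ids.add(publication_id)
--         availability = manifest.get("artifact_availability")
--         if availability == "local_pdf":
--             pdf_count += 1
--         if availability == "external_link":
--             external_count += 1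
--         if manifest.get("status") == "released":
--             target = released
--         elif manifest.get("status") == "superseded":
--             target = superseded
--         else:
--             target = planned
--         target[manifest.get("type", "unknown")] = target.get(manifest.get("type", "unknown"), 0) + 1
--     if released != EXPECTED_RELEASED_COUNTS:
--         errors.append(f"unexpected released counts: {released}, expected {EXPECTED_RELEASED_COUNTS}")
--     if superseded != EXPECTED_SUPERSEDED_COUNTS:
--         errors.append(f"unexpected superseded counts: {superseded}, expected {EXPECTED_SUPERSEDED_COUNTS}")
--     if planned != EXPECTED_PLANNED_COUNTS:
--         errors.append(f"unexpected planned counts: {planned}, expected {EXPECTED_PLANNED_COUNTS}")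
--     if pdf_count != EXPECTED_PDF_COUNT:
--         errors.append(f"unexpected PDF-bearing count: {pdf_count}, expected {EXPECTED_PDF_COUNT}")
--     if external_count != EXPECTED_EXTERNAL_COUNT:
--         errors.append(f"unexpected external-link count: {external_count}, expected {EXPECTED_EXTERNAL_COUNT}")
--     return errors
-- ===== SOURCE B (Python) =====
-- def validate_counts(manifests):
--     errors = []
--     seen = set()
--     for m in manifests:
--         pid = m.get("publication_id")
--         if pid in seen:
--             errors.append(f"duplicate publication_id: {pid}")
--         seen.add(pid)
--     pdf_count = sum(1 for m in manifests if m.get("artifact_availability") == "local_pdf")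
--     external_count = sum(1 for m in manifests if m.get("artifact_availability") == "external_link")
--
--     def bucket(m):
--         s = m.get("status")
--         return s if s in ("released", "superseded") else "planned"
--
--     def types_of(name):
--         return [m.get("type", "unknown") for m in manifests if bucket(m) == name]
--
--     def tally(types):
--         counts = {}
--         for t in types:
--             counts[t] = counts.get(t, 0) + 1
--         return counts
--
--     released = tally(types_of("released"))
--     superseded = tally(types_of("superseded"))
--     planned = tally(types_of("planned"))
--
--     for name, got, want in (
--         ("released", released, EXPECTED_RELEASED_COUNTS),
--         ("superseded", superseded, EXPECTED_SUPERSEDED_COUNTS),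
--         ("planned", planned, EXPECTED_PLANNED_COUNTS),
--     ):
--         if got != want:
--             errors.append(f"unexpected {name} counts: {got}, expected {want}")
--     for name, got, want in (
--         ("PDF-bearing", pdf_count, EXPECTED_PDF_COUNT),
--         ("external-link", external_count, EXPECTED_EXTERNAL_COUNT),
--     ):
--         if got != want:
--             errors.append(f"unexpected {name} count: {got}, expected {want}")
--     return errors
--
--
-- EXPECTED_RELEASED_COUNTS = {
--     "research_paper": 9,
--     "research_note": 6,
--     "public_good_briefing": 44,
--     "white_paper": 5,
--     "research_monograph": 7,
--     "monograph_supplement": 2,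
--     "synoptic_overview": 1,
--     "guided_tour": 7,
-- }
-- EXPECTED_SUPERSEDED_COUNTS = {"public_good_briefing": 1}
-- EXPECTED_PLANNED_COUNTS = {"charter_essay": 2}
-- EXPECTED_PDF_COUNT = 75
-- EXPECTED_EXTERNAL_COUNT = 7
-- ===== Notes on version B (the rewrite author's own statement) =====
-- stated objective: alternative
-- what changed: Replaced A's single fused loop carrying seven pieces of state with separate differently-shaped passes: a duplicate-detection pass with a seen-set, 0/1-sums over filtered lists for the two availability counts, and per-bucket tallies built from filtered type lists, with the five summary comparisons driven by two data-table loops.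
import Mathlib
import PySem

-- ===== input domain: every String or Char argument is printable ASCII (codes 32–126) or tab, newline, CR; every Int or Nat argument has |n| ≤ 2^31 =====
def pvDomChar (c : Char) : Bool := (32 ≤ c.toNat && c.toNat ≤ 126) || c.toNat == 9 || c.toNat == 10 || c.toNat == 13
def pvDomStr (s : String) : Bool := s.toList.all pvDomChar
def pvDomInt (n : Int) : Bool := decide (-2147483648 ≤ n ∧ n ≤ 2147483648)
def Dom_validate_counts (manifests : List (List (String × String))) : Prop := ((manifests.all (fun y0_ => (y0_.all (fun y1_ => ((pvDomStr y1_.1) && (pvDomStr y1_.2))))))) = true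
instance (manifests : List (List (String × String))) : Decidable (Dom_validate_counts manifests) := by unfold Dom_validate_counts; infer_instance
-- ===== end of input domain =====

-- B replaces A's single fused loop with separate passes (duplicate pass, 0/1-sums, per-bucket
-- tallies over filtered lists, table-driven summary checks); same cost, different decomposition.

-- ===== PORT A =====
-- shared helpers (both Pythons use dict.get, f-string formatting and dict ==; ported once, exact on the ASCII domain)
def mget (m : List (String × String)) (k : String) : Option String := (PySem.Dict.mk m).get? k

def pyStrOpt : Option String → String
  | none => "None"
  | some s => s

-- repr(s) for printable-ASCII strings (plus tab/newline/CR): CPython's quote choice and escapes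
def pyReprChars (cs : List Char) : List Char :=
  let q : Char := if cs.contains '\'' && !cs.contains '"' then '"' else '\''
  [q] ++ (cs.flatMap (fun c =>
    if c = '\\' then ['\\', '\\']
    else if c = q then ['\\', q]
    else if c = '\t' then ['\\', 't']
    else if c = '\n' then ['\\', 'n']
    else if c = '\r' then ['\\', 'r']
    else [c])) ++ [q]

def pyReprStr (s : String) : String := String.ofList (pyReprChars s.toList)

-- repr of a dict[str, int] (insertion order), as an f-string renders it
def fmtDict (d : PySem.Dict String Int) : String :=
  "{" ++ String.intercalate ", " (d.items.map (fun p => pyReprStr p.1 ++ ": " ++ PySem.Int.toStr p.2)) ++ "}"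

-- Python's dict == (ignores insertion order)
def pyDictEq (a b : PySem.Dict String Int) : Bool :=
  PySem.Set.equal (PySem.Set.ofList a.keys) (PySem.Set.ofList b.keys)
    && a.items.all (fun p => b.get? p.1 == some p.2)

def EXPECTED_RELEASED_COUNTS : PySem.Dict String Int := PySem.Dict.ofList
  [("research_paper", 9), ("research_note", 6), ("public_good_briefing", 44), ("white_paper", 5),
   ("research_monograph", 7), ("monograph_supplement", 2), ("synoptic_overview", 1), ("guided_tour", 7)]
def EXPECTED_SUPERSEDED_COUNTS : PySem.Dict String Int := PySem.Dict.ofList [("public_good_briefing", 1)]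
def EXPECTED_PLANNED_COUNTS : PySem.Dict String Int := PySem.Dict.ofList [("charter_essay", 2)]

def dupMsg (pid : Option String) : String := "duplicate publication_id: " ++ pyStrOpt pid
def dictMsg (name : String) (got want : PySem.Dict String Int) : String :=
  "unexpected " ++ name ++ " counts: " ++ fmtDict got ++ ", expected " ++ fmtDict want
def cntMsg (name : String) (got want : Int) : String :=
  "unexpected " ++ name ++ " count: " ++ PySem.Int.toStr got ++ ", expected " ++ PySem.Int.toStr want

-- A's loop body: seven pieces of state (released, superseded, planned, ids, errors, pdf_count, external_count)
def aStep (st : PySem.Dict String Int × PySem.Dict String Int × PySem.Dict String Int ×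
                PySem.Set (Option String) × List String × Int × Int)
    (m : List (String × String)) :
    PySem.Dict String Int × PySem.Dict String Int × PySem.Dict String Int ×
    PySem.Set (Option String) × List String × Int × Int :=
  match st with
  | (r, s, p, ids, errs, pc, ec) =>
    let pid := mget m "publication_id"
    let errs := if PySem.Set.contains ids pid then errs ++ [dupMsg pid] else errs
    let ids := PySem.Set.add ids pid
    let av := mget m "artifact_availability"
    let pc := if av == some "local_pdf" then pc + 1 else pc
    let ec := if av == some "external_link" then ec + 1 else ec
    let ty := (mget m "type").getD "unknown"
    if mget m "status" == some "released" then
      (r.insert ty (r.getD ty 0 + 1), s, p, ids, errs, pc, ec)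
    else if mget m "status" == some "superseded" then
      (r, s.insert ty (s.getD ty 0 + 1), p, ids, errs, pc, ec)
    else
      (r, s, p.insert ty (p.getD ty 0 + 1), ids, errs, pc, ec)

def validate_counts (manifests : List (List (String × String))) : List String :=
  match manifests.foldl aStep (PySem.Dict.empty, PySem.Dict.empty, PySem.Dict.empty, PySem.Set.empty, [], 0, 0) with
  | (released, superseded, planned, _ids, errors, pdf_count, external_count) =>
    let errors := if !(pyDictEq released EXPECTED_RELEASED_COUNTS) then
        errors ++ [dictMsg "released" released EXPECTED_RELEASED_COUNTS] else errors
    let errors := if !(pyDictEq superseded EXPECTED_SUPERSEDED_COUNTS) then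
        errors ++ [dictMsg "superseded" superseded EXPECTED_SUPERSEDED_COUNTS] else errors
    let errors := if !(pyDictEq planned EXPECTED_PLANNED_COUNTS) then
        errors ++ [dictMsg "planned" planned EXPECTED_PLANNED_COUNTS] else errors
    let errors := if pdf_count ≠ 75 then errors ++ [cntMsg "PDF-bearing" pdf_count 75] else errors
    let errors := if external_count ≠ 7 then errors ++ [cntMsg "external-link" external_count 7] else errors
    errors

-- ===== PORT B =====
def bDupStep (st : PySem.Set (Option String) × List String) (m : List (String × String)) :
    PySem.Set (Option String) × List String :=
  let pid := mget m "publication_id"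
  let errs := if PySem.Set.contains st.1 pid then st.2 ++ [dupMsg pid] else st.2
  (PySem.Set.add st.1 pid, errs)

def bucketOf (m : List (String × String)) : String :=
  let s := mget m "status"
  if s == some "released" then "released"
  else if s == some "superseded" then "superseded"
  else "planned"

def typesOf (manifests : List (List (String × String))) (name : String) : List String :=
  (manifests.filter (fun m => bucketOf m == name)).map (fun m => (mget m "type").getD "unknown")

def tally (types : List String) : PySem.Dict String Int :=
  types.foldl (fun d t => d.insert t (d.getD t 0 + 1)) PySem.Dict.empty

def validate_counts_alt (manifests : List (List (String × String))) : List String :=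
  let errors := (manifests.foldl bDupStep (PySem.Set.empty, [])).2
  let pdf_count : Int :=
    ((manifests.filter (fun m => mget m "artifact_availability" == some "local_pdf")).map (fun _ => (1 : Int))).sum
  let external_count : Int :=
    ((manifests.filter (fun m => mget m "artifact_availability" == some "external_link")).map (fun _ => (1 : Int))).sum
  let released := tally (typesOf manifests "released")
  let superseded := tally (typesOf manifests "superseded")
  let planned := tally (typesOf manifests "planned")
  let errors := [("released", released, EXPECTED_RELEASED_COUNTS),
                 ("superseded", superseded, EXPECTED_SUPERSEDED_COUNTS),
                 ("planned", planned, EXPECTED_PLANNED_COUNTS)].foldl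
    (fun es x => if !(pyDictEq x.2.1 x.2.2) then es ++ [dictMsg x.1 x.2.1 x.2.2] else es) errors
  let errors := [("PDF-bearing", pdf_count, (75 : Int)),
                 ("external-link", external_count, (7 : Int))].foldl
    (fun es x => if x.2.1 ≠ x.2.2 then es ++ [cntMsg x.1 x.2.1 x.2.2] else es) errors
  errors

-- ===== PRECONDITION & SPEC =====
def Spec_validate_counts (manifests : List (List (String × String))) (out : List String) : Prop := out = validate_counts_alt manifests
instance (manifests : List (List (String × String))) (out : List String) : Decidable (Spec_validate_counts manifests out) := by unfold Spec_validate_counts; infer_instance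

-- ===== CLAIM (what is proved, stated in full; the proofs are below) =====
def Claim_equal_validate_counts : Prop := ∀ (manifests : List (List (String × String))), Dom_validate_counts manifests → Spec_validate_counts manifests (validate_counts manifests)

-- ===== LEMMAS AND PROOFS =====
def pidOf (m : List (String × String)) : Option String := mget m "publication_id"

def dupFrom : PySem.Set (Option String) → List (List (String × String)) → List String
  | _, [] => []
  | ids, m :: t =>
    (if PySem.Set.contains ids (pidOf m) then [dupMsg (pidOf m)] else []) ++ dupFrom (PySem.Set.add ids (pidOf m)) t

def idsFrom (ids : PySem.Set (Option String)) (ms : List (List (String × String))) : PySem.Set (Option String) :=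
  ms.foldl (fun s m => PySem.Set.add s (pidOf m)) ids

lemma idsFrom_cons (ids : PySem.Set (Option String)) (m : List (String × String))
    (t : List (List (String × String))) :
    idsFrom ids (m :: t) = idsFrom (PySem.Set.add ids (pidOf m)) t := rfl

def avCnt (ms : List (List (String × String))) (v : String) : Int :=
  ((ms.filter (fun m => mget m "artifact_availability" == some v)).map (fun _ => (1 : Int))).sum

def tallyFrom (d : PySem.Dict String Int) (ts : List String) : PySem.Dict String Int :=
  ts.foldl (fun d t => d.insert t (d.getD t 0 + 1)) d

lemma dupFold (ms : List (List (String × String))) :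
    ∀ ids errs, ms.foldl bDupStep (ids, errs) = (idsFrom ids ms, errs ++ dupFrom ids ms) := by
  induction ms with
  | nil => intro ids errs; simp [idsFrom, dupFrom]
  | cons m t ih =>
    intro ids errs
    simp only [List.foldl_cons, bDupStep, idsFrom, dupFrom]
    rw [ih]
    refine Prod.ext rfl ?_
    simp only [pidOf]
    split <;> simp

lemma loopA (ms : List (List (String × String))) :
    ∀ r s p ids errs pc ec,
      ms.foldl aStep (r, s, p, ids, errs, pc, ec) =
        (tallyFrom r (typesOf ms "released"), tallyFrom s (typesOf ms "superseded"),
         tallyFrom p (typesOf ms "planned"), idsFrom ids ms, errs ++ dupFrom ids ms,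
         pc + avCnt ms "local_pdf", ec + avCnt ms "external_link") := by
  induction ms with
  | nil => intro r s p ids errs pc ec; simp [typesOf, tallyFrom, idsFrom, dupFrom, avCnt]
  | cons m t ih =>
    intro r s p ids errs pc ec
    simp only [List.foldl_cons, aStep]
    rw [ih]
    have havp : avCnt (m :: t) "local_pdf" =
        (if mget m "artifact_availability" == some "local_pdf" then 1 else 0) + avCnt t "local_pdf" := by
      simp only [avCnt, List.filter_cons]
      split <;> simp
    have have' : avCnt (m :: t) "external_link" =
        (if mget m "artifact_availability" == some "external_link" then 1 else 0) + avCnt t "external_link" := by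
      simp only [avCnt, List.filter_cons]
      split <;> simp
    have hty : ∀ name, typesOf (m :: t) name =
        (if bucketOf m == name then [(mget m "type").getD "unknown"] else []) ++ typesOf t name := by
      intro name
      simp only [typesOf, List.filter_cons]
      split <;> simp
    by_cases h1 : mget m "status" == some "released"
    · have hb : bucketOf m = "released" := by simp [bucketOf, h1]
      simp only [h1, if_true]
      rw [dupFrom]
      simp [hty, hb, tallyFrom, havp, have', pidOf, idsFrom_cons]
      exact ⟨by split <;> simp, by split <;> omega, by split <;> omega⟩
    · by_cases h2 : mget m "status" == some "superseded"
      · have hb : bucketOf m = "superseded" := by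
          simp only [bucketOf]
          rw [if_neg (by simpa using h1), if_pos h2]
        simp only [h1, h2, Bool.false_eq_true, if_false, if_true]
        rw [dupFrom]
        simp [hty, hb, tallyFrom, havp, have', pidOf, idsFrom_cons]
        exact ⟨by split <;> simp, by split <;> omega, by split <;> omega⟩
      · have hb : bucketOf m = "planned" := by
          simp only [bucketOf]
          rw [if_neg (by simpa using h1), if_neg (by simpa using h2)]
        simp only [h1, h2, Bool.false_eq_true, if_false]
        rw [dupFrom]
        simp [hty, hb, tallyFrom, havp, have', pidOf, idsFrom_cons]
        exact ⟨by split <;> simp, by split <;> omega, by split <;> omega⟩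

-- ===== VERDICT (by name: the statement is the Claim_ definition above) =====
theorem validate_counts_spec : Claim_equal_validate_counts := by
  intro manifests _
  unfold Spec_validate_counts validate_counts validate_counts_alt
  rw [loopA, dupFold]
  simp only [List.foldl_cons, List.foldl_nil, List.nil_append, zero_add]
  rfl
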